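-- pv_equiv track=rewrite | github.com/hosungseo/gov-press-md | scripts/normalize_ministries.py | replace_line_prefix
-- ===== SOURCE A (Python) =====
-- def replace_line_prefix(lines, prefix, new_line):
--     out = []
--     replaced = False
--     for line in lines:
--         if line.startswith(prefix):
--             out.append(new_line)
--             replaced = True
--         else:
--             out.append(line)
--     return out, replaced
-- ===== SOURCE B (Python) =====
-- def replace_line_prefix(lines, prefix, new_line):
--     lines = list(lines)
--     replaced = any(line.startswith(prefix) for line in lines)
--     out = [new_line if line.startswith(prefix) else line for line in lines]
--     return out, replaced
-- ===== Notes on version B (the rewrite author's own statement) =====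
-- stated objective: simpler
-- what changed: A's single interleaved detect-and-build loop with a list accumulator and a mutable flag becomes two independent single-purpose passes: an any() for the flag and a list comprehension for the output.
import Mathlib
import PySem

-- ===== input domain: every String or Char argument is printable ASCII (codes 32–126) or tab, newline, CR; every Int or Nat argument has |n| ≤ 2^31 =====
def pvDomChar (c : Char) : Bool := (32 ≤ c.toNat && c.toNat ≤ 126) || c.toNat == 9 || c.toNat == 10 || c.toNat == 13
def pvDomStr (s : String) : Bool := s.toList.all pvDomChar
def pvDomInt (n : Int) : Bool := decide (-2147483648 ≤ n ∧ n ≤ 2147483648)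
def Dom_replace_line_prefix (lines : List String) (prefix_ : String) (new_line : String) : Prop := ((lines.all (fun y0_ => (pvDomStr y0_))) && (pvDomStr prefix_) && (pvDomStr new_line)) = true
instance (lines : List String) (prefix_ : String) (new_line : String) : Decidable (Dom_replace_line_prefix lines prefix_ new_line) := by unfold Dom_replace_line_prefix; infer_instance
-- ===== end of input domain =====

-- B replaces A's single interleaved detect-and-build loop by two independent single-purpose passes (any + map); objective: simpler, no speed claim.

-- ===== PORT A =====
-- literal port of A: one fold over lines carrying (out, replaced)
def replace_line_prefix (lines : List String) (prefix_ : String) (new_line : String) : List String × Bool :=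
  lines.foldl (fun acc line =>
    if PySem.Str.startswith line prefix_ then (acc.1 ++ [new_line], true)
    else (acc.1 ++ [line], acc.2)) ([], false)

-- ===== PORT B =====
-- B: two independent passes — any() for the flag, a comprehension (map) for the output
def replace_line_prefix_alt (lines : List String) (prefix_ : String) (new_line : String) : List String × Bool :=
  (lines.map (fun line => if PySem.Str.startswith line prefix_ then new_line else line),
   lines.any (fun line => PySem.Str.startswith line prefix_))

-- ===== PRECONDITION & SPEC =====
def Spec_replace_line_prefix (lines : List String) (prefix_ : String) (new_line : String) (out : List String × Bool) : Prop := out = replace_line_prefix_alt lines prefix_ new_line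
instance (lines : List String) (prefix_ : String) (new_line : String) (out : List String × Bool) : Decidable (Spec_replace_line_prefix lines prefix_ new_line out) := by unfold Spec_replace_line_prefix; infer_instance

-- ===== CLAIM (what is proved, stated in full; the proofs are below) =====
def Claim_equal_replace_line_prefix : Prop := ∀ (lines : List String) (prefix_ : String) (new_line : String), Dom_replace_line_prefix lines prefix_ new_line → Spec_replace_line_prefix lines prefix_ new_line (replace_line_prefix lines prefix_ new_line)

-- ===== LEMMAS AND PROOFS =====

theorem rlp_fold (lines : List String) (prefix_ new_line : String) (acc : List String) (b : Bool) :
    lines.foldl (fun acc line =>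
      if PySem.Str.startswith line prefix_ then (acc.1 ++ [new_line], true)
      else (acc.1 ++ [line], acc.2)) (acc, b)
    = (acc ++ lines.map (fun line => if PySem.Str.startswith line prefix_ then new_line else line),
       b || lines.any (fun line => PySem.Str.startswith line prefix_)) := by
  induction lines generalizing acc b with
  | nil => simp
  | cons hd tl ih =>
    simp only [List.foldl_cons, List.map_cons, List.any_cons]
    by_cases h : PySem.Str.startswith hd prefix_ <;> simp only [h, if_true, Bool.false_or, ih, Bool.true_or] <;> simp

-- ===== VERDICT (by name: the statement is the Claim_ definition above) =====
theorem replace_line_prefix_spec : Claim_equal_replace_line_prefix := by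
  intro lines prefix_ new_line _
  show _ = _
  unfold replace_line_prefix replace_line_prefix_alt
  simpa using rlp_fold lines prefix_ new_line [] false
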